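-- pv_equiv track=rewrite | github.com/simsong/dfxml | demos/vmstats/latex_tools.py | parse_nested_braces
-- ===== SOURCE A (Python) =====
-- def parse_nested_braces(string):
--     """Generate parenthesized contents in string as pairs (level, contents)."""
--     stack = []
--     for i, c in enumerate(string):
--         if c == '{':
--             stack.append(i)
--         elif c == '}' and stack:
--             start = stack.pop()
--             yield (len(stack), string[start + 1: i])
-- ===== SOURCE B (Python) =====
-- def parse_nested_braces(string):
--     """Generate parenthesized contents in string as pairs (level, contents)."""
--     n = len(string)
--
--     def go(i, depth):
--         # Yield completed groups in close order; return (index just past the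
--         # '}' closing this level, True) or (n, False) if no such '}' exists.
--         while i < n:
--             c = string[i]
--             if c == '{':
--                 opener = i
--                 i, closed = yield from go(i + 1, depth + 1)
--                 if closed:
--                     yield (depth, string[opener + 1: i - 1])
--             elif c == '}' and depth > 0:
--                 return i + 1, True
--             else:
--                 i += 1
--         return i, False
--
--     yield from go(0, 0)
-- ===== Notes on version B (the rewrite author's own statement) =====
-- stated objective: alternative
-- what changed: Replaces A's single scan with an explicit stack of opening indices by a recursive-descent parser whose helper scans at a given depth, recurses on an opening brace, and yields a group after its inner groups once its matching closing brace is found (nesting level = recursion depth).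
import Mathlib
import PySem

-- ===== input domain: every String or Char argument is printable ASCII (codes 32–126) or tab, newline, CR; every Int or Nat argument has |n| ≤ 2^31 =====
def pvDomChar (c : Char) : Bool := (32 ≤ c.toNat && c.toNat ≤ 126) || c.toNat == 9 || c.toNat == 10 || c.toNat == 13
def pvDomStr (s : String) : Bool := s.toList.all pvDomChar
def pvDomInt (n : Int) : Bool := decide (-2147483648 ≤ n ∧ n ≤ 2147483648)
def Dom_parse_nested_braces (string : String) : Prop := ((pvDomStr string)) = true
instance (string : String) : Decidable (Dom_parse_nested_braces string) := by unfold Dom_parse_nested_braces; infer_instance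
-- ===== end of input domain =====

-- B replaces A's explicit index stack + single scan by a recursive-descent parser
-- (depth = recursion level); same return value, different decomposition (objective: alternative).
-- Both Pythons are generators; the ports compare the materialised list of yields.

-- ===== PORT A =====
-- the 'for i, c in enumerate(string)' loop of A, structural recursion over the enumerated list;
-- state: stack of opening indices, accumulator of yields
def pvLoopA (string : String) : List (Int × Char) → List Int → List (Int × String) → List (Int × String)
  | [], _, out => out
  | (i, c) :: rest, stack, out =>
    if c = '{' then
      pvLoopA string rest (i :: stack) out
    else if c = '}' then
      match stack with
      | [] => pvLoopA string rest [] out            -- 'and stack' fails: no-op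
      | start :: stack' =>
          pvLoopA string rest stack'
            (out ++ [((stack'.length : Int), PySem.Str.slice string (some (start + 1)) (some i))])
    else pvLoopA string rest stack out

def parse_nested_braces (string : String) : List (Int × String) :=
  pvLoopA string (PySem.List.enumerate string.toList 0) [] []

-- ===== PORT B =====
-- recursive-descent helper 'go' of Source B; fuel is only a totality guard (the scan position
-- strictly increases, so fuel length+1 is never exhausted); returns (yields, next index, closed?)
def pvGoB (string : String) : Nat → Nat → Nat → List (Int × String) × Nat × Bool
  | 0, i, _ => ([], i, false)
  | f + 1, i, depth =>
    if _h : i < string.toList.length then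
      let c := string.toList[i]
      if c = '{' then
        let r := pvGoB string f (i + 1) (depth + 1)
        let yld := if r.2.2 then
            [((depth : Int), PySem.Str.slice string (some ((i : Int) + 1)) (some ((r.2.1 : Int) - 1)))]
          else []
        let r' := pvGoB string f r.2.1 depth
        (r.1 ++ yld ++ r'.1, r'.2.1, r'.2.2)
      else if c = '}' then
        if 0 < depth then ([], i + 1, true)
        else pvGoB string f (i + 1) depth
      else pvGoB string f (i + 1) depth
    else ([], i, false)

def parse_nested_braces_alt (string : String) : List (Int × String) :=
  (pvGoB string (string.toList.length + 1) 0 0).1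

-- ===== PRECONDITION & SPEC =====
def Spec_parse_nested_braces (string : String) (out : List (Int × String)) : Prop := out = parse_nested_braces_alt string
instance (string : String) (out : List (Int × String)) : Decidable (Spec_parse_nested_braces string out) := by unfold Spec_parse_nested_braces; infer_instance

-- ===== CLAIM (what is proved, stated in full; the proofs are below) =====
def Claim_equal_parse_nested_braces : Prop := ∀ (string : String), Dom_parse_nested_braces string → Spec_parse_nested_braces string (parse_nested_braces string)

-- ===== LEMMAS AND PROOFS =====

-- the suffix of the enumerated string from position i
def pvEnumFrom (s : List Char) (i : Nat) : List (Int × Char) :=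
  PySem.List.enumerate (s.drop i) (i : Int)

theorem pvEnumFrom_zero (s : List Char) : pvEnumFrom s 0 = PySem.List.enumerate s 0 := by
  simp [pvEnumFrom]

theorem pvEnumFrom_cons (s : List Char) (i : Nat) (h : i < s.length) :
    pvEnumFrom s i = ((i : Int), s[i]) :: pvEnumFrom s (i + 1) := by
  have hd : s.drop i = s[i] :: s.drop (i + 1) := List.drop_eq_getElem_cons h
  rw [pvEnumFrom, hd, PySem.List.enumerate_cons, pvEnumFrom]
  push_cast
  rfl

theorem pvEnumFrom_past (s : List Char) (i : Nat) (h : s.length ≤ i) :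
    pvEnumFrom s i = [] := by
  simp [pvEnumFrom, List.drop_eq_nil_of_le h]

theorem pvGoB_past (string : String) (f i d : Nat) (h : string.toList.length ≤ i) :
    pvGoB string f i d = ([], i, false) := by
  cases f with
  | zero => rfl
  | succ f =>
    unfold pvGoB
    rw [dif_neg (Nat.not_lt.mpr h)]

-- bounds of B's scanner: the position never decreases, and when 'go' returns
-- closed = false it has reached the end of the string
theorem pvGoB_bounds (string : String) :
    ∀ f i d, string.toList.length - i < f →
      i ≤ (pvGoB string f i d).2.1 ∧
      ((pvGoB string f i d).2.2 = false → string.toList.length ≤ (pvGoB string f i d).2.1) := by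
  intro f
  induction f with
  | zero => intro i d h; omega
  | succ f ih =>
    intro i d h
    by_cases hi : i < string.toList.length
    · by_cases hc : string.toList[i] = '{'
      · have h1 := ih (i + 1) (d + 1) (by omega)
        rcases hr1 : pvGoB string f (i + 1) (d + 1) with ⟨o1, j1, c1⟩
        rw [hr1] at h1
        have h2 := ih j1 d (by simp at h1; omega)
        rcases hr2 : pvGoB string f j1 d with ⟨o2, j2, c2⟩
        rw [hr2] at h2
        simp only [pvGoB, dif_pos hi, if_pos hc, hr1, hr2]
        simp at h1 h2 ⊢
        obtain ⟨h1a, h1b⟩ := h1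
        obtain ⟨h2a, h2b⟩ := h2
        refine ⟨by omega, fun hf => ?_⟩
        have := h2b hf
        omega
      · by_cases hc2 : string.toList[i] = '}'
        · by_cases hd : 0 < d
          · simp only [pvGoB, dif_pos hi, if_neg hc, if_pos hc2, if_pos hd]
            simp
          · have h1 := ih (i + 1) d (by omega)
            simp only [pvGoB, dif_pos hi, if_neg hc, if_pos hc2, if_neg hd]
            exact ⟨by omega, fun hf => h1.2 hf⟩
        · have h1 := ih (i + 1) d (by omega)
          simp only [pvGoB, dif_pos hi, if_neg hc, if_neg hc2]
          exact ⟨by omega, fun hf => h1.2 hf⟩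
    · rw [pvGoB_past string _ _ _ (by omega)]
      have hl : string.toList.length = string.length := by simp
      simp
      omega

-- main invariant: A's loop from position i with stack 'st' equals B's 'go' at the
-- same position with depth = st.length, plus — when go closes a group — A's pop/yield
-- and the continuation of A's loop past the closing brace.
theorem pvMain (string : String) :
    ∀ f i (st : List Int) (out : List (Int × String)),
      string.toList.length - i < f →
      pvLoopA string (pvEnumFrom string.toList i) st out =
        (match pvGoB string f i st.length, st with
         | (o, j, true), start :: st' =>
             pvLoopA string (pvEnumFrom string.toList j) st'
               ((out ++ o) ++ [((st'.length : Int), PySem.Str.slice string (some (start + 1)) (some ((j : Int) - 1)))])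
         | (o, _, true), [] => out ++ o
         | (o, _, false), _ => out ++ o) := by
  intro f
  induction f with
  | zero => intro i st out h; omega
  | succ f ih =>
    intro i st out h
    by_cases hi : i < string.toList.length
    · rw [pvEnumFrom_cons string.toList i hi]
      simp only [pvLoopA]
      by_cases hc : string.toList[i] = '{'
      · rw [if_pos hc]
        have h1 := ih (i + 1) ((i : Int) :: st) out (by omega)
        simp only [List.length_cons] at h1
        have hb1 := pvGoB_bounds string f (i + 1) (st.length + 1) (by omega)
        rcases hr1 : pvGoB string f (i + 1) (st.length + 1) with ⟨o1, j1, c1⟩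
        rw [hr1] at h1 hb1
        simp only at hb1
        cases c1 with
        | true =>
          have hb1a := hb1.1
          simp only at h1
          have h2 := ih j1 st ((out ++ o1) ++
            [((st.length : Int), PySem.Str.slice string (some ((i : Int) + 1)) (some ((j1 : Int) - 1)))])
            (by omega)
          rcases hr2 : pvGoB string f j1 st.length with ⟨o2, j2, c2⟩
          rw [hr2] at h2
          rw [h1, h2]
          simp only [pvGoB, dif_pos hi, if_pos hc, hr1, hr2]
          cases c2 with
          | true =>
            cases st with
            | nil => simp
            | cons start st' => simp
          | false => simp
        | false =>
          have hb1b := hb1.2 rfl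
          simp only at h1
          rw [h1]
          simp only [pvGoB, dif_pos hi, if_pos hc, hr1,
            pvGoB_past string f j1 (st.length) (by omega)]
          cases st <;> simp
      · by_cases hc2 : string.toList[i] = '}'
        · rw [if_neg hc, if_pos hc2]
          cases st with
          | nil =>
            have h1 := ih (i + 1) [] out (by omega)
            simp only [List.length_nil] at h1 ⊢
            simp only [pvGoB, dif_pos hi, if_neg hc, if_pos hc2, Nat.lt_irrefl]
            exact h1
          | cons start st' =>
            simp only [pvGoB, dif_pos hi, if_neg hc, if_pos hc2, List.length_cons,
              if_pos (by omega : 0 < st'.length + 1)]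
            have hcast : ((i : Int) + 1 - 1) = (i : Int) := by ring
            push_cast
            rw [hcast]
            simp
        · rw [if_neg hc, if_neg hc2]
          have h1 := ih (i + 1) st out (by omega)
          simp only [pvGoB, dif_pos hi, if_neg hc, if_neg hc2]
          exact h1
    · rw [pvEnumFrom_past string.toList i (by omega), pvGoB_past string _ _ _ (by omega)]
      cases st <;> simp [pvLoopA]

-- ===== VERDICT (by name: the statement is the Claim_ definition above) =====
theorem parse_nested_braces_spec : Claim_equal_parse_nested_braces := by
  intro s _
  unfold Spec_parse_nested_braces parse_nested_braces parse_nested_braces_alt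
  have h := pvMain s (s.toList.length + 1) 0 [] [] (by omega)
  rw [pvEnumFrom_zero] at h
  rw [h]
  simp only [List.length_nil]
  rcases pvGoB s (s.toList.length + 1) 0 0 with ⟨o, j, c⟩
  cases c <;> simp
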